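-- pv_equiv track=rewrite | github.com/nadineloepfe/mirrornode-transactionsize-check | get_statistics.py | collect_sequence
-- ===== SOURCE A (Python) =====
-- def collect_sequence(start_index, all_transactions):
--     """
--     Collects a sequence of transactions starting from a FILECREATE,
--     grouping by entity_id.
--     """
--     sequence = []
--     indices = []
--     n = len(all_transactions)
--     file_entity_id = all_transactions[start_index]['entity_id']
--
--     if not file_entity_id:
--         # cannot proceed without a valid entity_id
--         return [], []
--
--     append_count = 0
--
--     for i in range(start_index, n):
--         tx = all_transactions[i]
--
--         # skip transactions with None entity_id
--         if tx['type'] in ['FILEAPPEND', 'FILEDELETE'] and not tx['entity_id']: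
--             continue
--
--         # check file operations have the same entity_id
--         if tx['type'] in ['FILEAPPEND', 'FILEDELETE']:
--             if tx['entity_id'] != file_entity_id:
--                 continue
--
--         sequence.append(tx)
--         indices.append(i)
--
--         if tx['type'] == 'FILEAPPEND':
--             append_count += 1
--         elif tx['type'] == 'FILEDELETE':
--             break
--
--     return sequence, indices
-- ===== SOURCE B (Python) =====
-- def collect_sequence(start_index, all_transactions):
--     """
--     Collects a sequence of transactions starting from a FILECREATE,
--     grouping by entity_id.  Two-phase decomposition: first locate the
--     stop position (first matching FILEDELETE, scanning lazily so no
--     record past it is touched), then filter the closed range up to it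
--     into (index, tx) pairs and unzip.
--     """
--     file_entity_id = all_transactions[start_index]['entity_id']
--     if not file_entity_id:
--         return [], []
--
--     def keep(tx):
--         if tx['type'] in ('FILEAPPEND', 'FILEDELETE'):
--             return tx['entity_id'] == file_entity_id
--         return True
--
--     n = len(all_transactions)
--
--     stop = n - 1
--     for i in range(start_index, n):
--         tx = all_transactions[i]
--         if keep(tx) and tx['type'] == 'FILEDELETE':
--             stop = i
--             break
--
--     kept = [(i, all_transactions[i])
--             for i in range(start_index, stop + 1)
--             if keep(all_transactions[i])]
--
--     return [tx for _, tx in kept], [i for i, _ in kept]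
-- ===== Notes on version B (the rewrite author's own statement) =====
-- stated objective: alternative
-- what changed: Replaces A's single fused loop with continue/break and an append counter by a phase-separated pipeline: lazily find the stop position (the first FILEDELETE matching the entity_id), then filter the closed index range up to it with one keep-predicate into (index, tx) pairs and unzip; the unused append_count is dropped.
import Mathlib
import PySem

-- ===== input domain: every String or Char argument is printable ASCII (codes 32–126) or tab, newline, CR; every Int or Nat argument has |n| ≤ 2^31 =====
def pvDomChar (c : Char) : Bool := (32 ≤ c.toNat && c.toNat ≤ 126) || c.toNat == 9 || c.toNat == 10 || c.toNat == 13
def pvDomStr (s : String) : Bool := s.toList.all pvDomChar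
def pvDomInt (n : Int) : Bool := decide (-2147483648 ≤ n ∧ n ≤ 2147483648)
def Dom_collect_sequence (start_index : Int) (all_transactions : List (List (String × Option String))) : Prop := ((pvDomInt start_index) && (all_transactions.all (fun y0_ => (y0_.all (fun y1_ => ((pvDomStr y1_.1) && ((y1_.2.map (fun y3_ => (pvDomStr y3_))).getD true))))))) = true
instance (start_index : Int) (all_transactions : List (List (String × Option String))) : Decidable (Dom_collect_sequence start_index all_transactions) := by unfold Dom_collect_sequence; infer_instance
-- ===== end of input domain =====

-- B replaces A's single fused loop (continue/break, append counter) by a phase-separated pipeline: lazily find the stop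
-- position (first matching FILEDELETE), then filter the closed range up to it and unzip: an alternative decomposition,
-- same cost; equivalence of the return values is proved on Pre_ below.

-- Python truthiness of an Optional[str] value: None and '' are falsy.
def pvTruthy : Option String → Bool
  | none => false
  | some s => !(s == "")

-- ===== PORT A =====
-- the for-loop of A: state (sequence, indices, append_count); 'continue' = recurse unchanged, 'break' = stop
def pvLoopA (ats : List (List (String × Option String))) (fid : Option String) :
    List Int → List (List (String × Option String)) → List Int → Int →
    (List (List (String × Option String))) × List Int
  | [], seq, idxs, _ => (seq, idxs)
  | i :: rest, seq, idxs, cnt =>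
    match PySem.List.pyGet? ats i with
    | none => (seq, idxs)  -- IndexError: unreachable for i in range(start_index, n) under Pre_
    | some tx =>
      let ty := (List.lookup "type" tx).getD none        -- tx['type']; KeyError excluded by Pre_
      let ent := (List.lookup "entity_id" tx).getD none  -- tx['entity_id']; KeyError excluded by Pre_
      if (ty = some "FILEAPPEND" ∨ ty = some "FILEDELETE") ∧ pvTruthy ent = false then
        pvLoopA ats fid rest seq idxs cnt
      else if (ty = some "FILEAPPEND" ∨ ty = some "FILEDELETE") ∧ ent ≠ fid then
        pvLoopA ats fid rest seq idxs cnt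
      else
        if ty = some "FILEAPPEND" then
          pvLoopA ats fid rest (seq ++ [tx]) (idxs ++ [i]) (cnt + 1)
        else if ty = some "FILEDELETE" then (seq ++ [tx], idxs ++ [i])
        else pvLoopA ats fid rest (seq ++ [tx]) (idxs ++ [i]) cnt

def collect_sequence (start_index : Int) (all_transactions : List (List (String × Option String))) : (List (List (String × Option String))) × List Int :=
  let n : Int := all_transactions.length
  match PySem.List.pyGet? all_transactions start_index with
  | none => ([], [])  -- IndexError: excluded by Pre_
  | some d0 =>
    let fid := (List.lookup "entity_id" d0).getD none
    if pvTruthy fid = false then ([], [])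
    else pvLoopA all_transactions fid (PySem.List.pyRange start_index n 1) [] [] 0

-- ===== PORT B =====
-- keep(tx) of Source B
def pvKeep (fid : Option String) (tx : List (String × Option String)) : Bool :=
  if (List.lookup "type" tx).getD none = some "FILEAPPEND" ∨ (List.lookup "type" tx).getD none = some "FILEDELETE" then
    decide ((List.lookup "entity_id" tx).getD none = fid)
  else true

-- phase 1 of Source B: scan the range for the first kept FILEDELETE; the carried value is the 'stop' variable
def pvFindStop (ats : List (List (String × Option String))) (fid : Option String) :
    List Int → Int → Int
  | [], stop => stop
  | i :: rest, stop =>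
    let tx := (PySem.List.pyGet? ats i).getD []  -- i comes from range(start_index, n): IndexError excluded by Pre_
    if pvKeep fid tx = true ∧ (List.lookup "type" tx).getD none = some "FILEDELETE" then i
    else pvFindStop ats fid rest stop

-- phase 2 of Source B: the filtering comprehension
def pvKept (ats : List (List (String × Option String))) (fid : Option String) (is : List Int) :
    List (Int × List (String × Option String)) :=
  is.filterMap (fun i => (PySem.List.pyGet? ats i).bind (fun tx => if pvKeep fid tx then some (i, tx) else none))

def collect_sequence_alt (start_index : Int) (all_transactions : List (List (String × Option String))) : (List (List (String × Option String))) × List Int :=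
  match PySem.List.pyGet? all_transactions start_index with
  | none => ([], [])  -- IndexError: excluded by Pre_
  | some d0 =>
    let fid := (List.lookup "entity_id" d0).getD none
    if pvTruthy fid = false then ([], [])
    else
      let n : Int := all_transactions.length
      let stop := pvFindStop all_transactions fid (PySem.List.pyRange start_index n 1) (n - 1)
      let kept := pvKept all_transactions fid (PySem.List.pyRange start_index (stop + 1) 1)
      (kept.map Prod.snd, kept.map Prod.fst)

-- ===== PRECONDITION & SPEC =====
-- a transaction dict that A (and B) can read without a KeyError
def pvWF (d : List (String × Option String)) : Prop :=
  (List.lookup "type" d).isSome ∧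
  (((List.lookup "type" d).getD none = some "FILEAPPEND" ∨ (List.lookup "type" d).getD none = some "FILEDELETE") →
    (List.lookup "entity_id" d).isSome)

-- 'a FILEDELETE matching the entity_id at index i' — where A's scan (and B's) stops
def pvIsKD (ats : List (List (String × Option String))) (fid : Option String) (i : Int) : Bool :=
  ((List.lookup "type" ((PySem.List.pyGet? ats i).getD [])).getD none == some "FILEDELETE") &&
  ((List.lookup "entity_id" ((PySem.List.pyGet? ats i).getD [])).getD none == fid)

-- Pre_ excludes exactly the inputs on which A raises: start_index out of range or a missing 'entity_id' key at it
-- (IndexError/KeyError), or a dict that A's scan actually reaches (an index with no earlier matching FILEDELETE in the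
-- range) missing a key the loop reads there (KeyError). B raises the same exceptions on the same inputs.
def Pre_collect_sequence (start_index : Int) (all_transactions : List (List (String × Option String))) : Prop :=
  PySem.Raise.InRange all_transactions.length start_index ∧
  (List.lookup "entity_id" ((PySem.List.pyGet? all_transactions start_index).getD [])).isSome ∧
  (pvTruthy ((List.lookup "entity_id" ((PySem.List.pyGet? all_transactions start_index).getD [])).getD none) = true →
    ∀ i ∈ PySem.List.pyRange start_index (all_transactions.length : Int) 1,
      (∀ j ∈ PySem.List.pyRange start_index (all_transactions.length : Int) 1, j < i →
        pvIsKD all_transactions ((List.lookup "entity_id" ((PySem.List.pyGet? all_transactions start_index).getD [])).getD none) j = false) →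
      pvWF ((PySem.List.pyGet? all_transactions i).getD []))

instance (start_index : Int) (all_transactions : List (List (String × Option String))) : Decidable (Pre_collect_sequence start_index all_transactions) := by
  unfold Pre_collect_sequence pvWF PySem.Raise.InRange; infer_instance

def pvWitness_collect_sequence : Int × (List (List (String × Option String))) :=
  (0, [[("type", some "FILECREATE"), ("entity_id", some "f1")],
       [("type", some "FILEAPPEND"), ("entity_id", some "f1")],
       [("type", some "FILEDELETE"), ("entity_id", some "f1")]])

def Spec_collect_sequence (start_index : Int) (all_transactions : List (List (String × Option String))) (out : (List (List (String × Option String))) × List Int) : Prop := out = collect_sequence_alt start_index all_transactions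
instance (start_index : Int) (all_transactions : List (List (String × Option String))) (out : (List (List (String × Option String))) × List Int) : Decidable (Spec_collect_sequence start_index all_transactions out) := by unfold Spec_collect_sequence; infer_instance

-- ===== CLAIM (what is proved, stated in full; the proofs are below) =====
def Claim_equal_collect_sequence : Prop := ∀ (start_index : Int) (all_transactions : List (List (String × Option String))), Dom_collect_sequence start_index all_transactions → Pre_collect_sequence start_index all_transactions → Spec_collect_sequence start_index all_transactions (collect_sequence start_index all_transactions)

-- ===== LEMMAS AND PROOFS =====

-- proof-side normal form: cut a kept list at its first FILEDELETE pair, inclusively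
def pvCut : List (Int × List (String × Option String)) → List (Int × List (String × Option String))
  | [] => []
  | p :: rest =>
    if (List.lookup "type" p.2).getD none = some "FILEDELETE" then [p]
    else p :: pvCut rest

-- proof-side normal form: the prefix of an index list up to and including its first matching FILEDELETE
def pvTake (ats : List (List (String × Option String))) (fid : Option String) :
    List Int → List Int
  | [] => []
  | i :: rest => if pvIsKD ats fid i then [i] else i :: pvTake ats fid rest

-- pvIsKD i ↔ the scan's stop condition at i (when fid is truthy)
lemma pvIsKD_iff (ats : List (List (String × Option String))) (fid : Option String) (i : Int) :
    pvIsKD ats fid i = true ↔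
      (pvKeep fid ((PySem.List.pyGet? ats i).getD []) = true ∧
       (List.lookup "type" ((PySem.List.pyGet? ats i).getD [])).getD none = some "FILEDELETE") := by
  unfold pvIsKD pvKeep
  constructor
  · intro h; simp at h; simp [h]
  · rintro ⟨hk, hd⟩; simp [hd] at hk ⊢; simpa [hd] using hk

-- A's loop equals cut-after-filter on any index list whose gets all succeed  (unchanged from the pipeline view)
lemma pvLoop_eq (ats : List (List (String × Option String))) (fid : Option String)
    (hfid : pvTruthy fid = true) :
    ∀ (is : List Int), (∀ i ∈ is, (PySem.List.pyGet? ats i).isSome = true) →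
    ∀ (seq : List (List (String × Option String))) (idxs : List Int) (cnt : Int),
      pvLoopA ats fid is seq idxs cnt =
        (seq ++ (pvCut (pvKept ats fid is)).map Prod.snd,
         idxs ++ (pvCut (pvKept ats fid is)).map Prod.fst) := by
  intro is
  induction is with
  | nil => intro _ seq idxs cnt; simp [pvLoopA, pvKept, pvCut]
  | cons i rest ih =>
    intro hsome seq idxs cnt
    obtain ⟨tx, htx⟩ := Option.isSome_iff_exists.mp (hsome i (by simp))
    have hrest : ∀ j ∈ rest, (PySem.List.pyGet? ats j).isSome = true := fun j hj => hsome j (by simp [hj])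
    by_cases hop : (List.lookup "type" tx).getD none = some "FILEAPPEND" ∨ (List.lookup "type" tx).getD none = some "FILEDELETE"
    · by_cases heq : (List.lookup "entity_id" tx).getD none = fid
      · -- kept file operation
        have hkeep : pvKeep fid tx = true := by simp [pvKeep, hop, heq]
        have htr : pvTruthy ((List.lookup "entity_id" tx).getD none) = true := heq ▸ hfid
        by_cases hdel : (List.lookup "type" tx).getD none = some "FILEDELETE"
        · simp [pvLoopA, htx, heq, pvKept, hkeep, pvCut, hdel]
          rcases hop with hap | _ <;> simp_all
        · have hap : (List.lookup "type" tx).getD none = some "FILEAPPEND" := by tauto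
          simp [pvLoopA, htx, heq, hfid, hap, pvKept, hkeep, pvCut,
                ih hrest (seq ++ [tx]) (idxs ++ [i]) (cnt + 1)]
      · -- skipped file operation
        have hkeep : pvKeep fid tx = false := by simp [pvKeep, hop, heq]
        by_cases htr : pvTruthy ((List.lookup "entity_id" tx).getD none) = true
        · simp [pvLoopA, htx, hop, heq, htr, pvKept, hkeep, ih hrest seq idxs cnt]
        · simp at htr
          simp [pvLoopA, htx, hop, htr, pvKept, hkeep, ih hrest seq idxs cnt]
    · -- ordinary transaction: always kept, never a delete
      have hkeep : pvKeep fid tx = true := by simp [pvKeep, hop]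
      have hnd : ¬ (List.lookup "type" tx).getD none = some "FILEDELETE" := fun h => hop (Or.inr h)
      have hna : ¬ (List.lookup "type" tx).getD none = some "FILEAPPEND" := fun h => hop (Or.inl h)
      simp [pvLoopA, htx, hna, hnd, pvKept, hkeep, pvCut,
            ih hrest (seq ++ [tx]) (idxs ++ [i]) cnt]

-- cut-after-filter = filter-after-take, on any index list whose gets all succeed
lemma pvCut_kept_eq (ats : List (List (String × Option String))) (fid : Option String) :
    ∀ (is : List Int), (∀ i ∈ is, (PySem.List.pyGet? ats i).isSome = true) →
      pvCut (pvKept ats fid is) = pvKept ats fid (pvTake ats fid is) := by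
  intro is
  induction is with
  | nil => intro _; simp [pvKept, pvCut, pvTake]
  | cons i rest ih =>
    intro hsome
    obtain ⟨tx, htx⟩ := Option.isSome_iff_exists.mp (hsome i (by simp))
    have hrest : ∀ j ∈ rest, (PySem.List.pyGet? ats j).isSome = true := fun j hj => hsome j (by simp [hj])
    by_cases hkd : pvIsKD ats fid i = true
    · obtain ⟨hk, hd⟩ := (pvIsKD_iff ats fid i).mp hkd
      rw [htx] at hk hd; simp at hk hd
      simp [pvTake, hkd, pvKept, htx, hk, pvCut, hd]
    · by_cases hk : pvKeep fid tx = true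
      · have hnd : ¬ (List.lookup "type" tx).getD none = some "FILEDELETE" := by
          intro hd
          exact hkd ((pvIsKD_iff ats fid i).mpr (by rw [htx]; exact ⟨hk, hd⟩))
        simp [pvTake, hkd, pvKept, htx, hk, pvCut, hnd]
        simpa [pvKept] using ih hrest
      · simp at hk
        simp [pvTake, hkd, pvKept, htx, hk]
        simpa [pvKept] using ih hrest

-- pvFindStop returns its default or an element of the list
lemma pvFindStop_mem (ats : List (List (String × Option String))) (fid : Option String) :
    ∀ (is : List Int) (d : Int), pvFindStop ats fid is d = d ∨ pvFindStop ats fid is d ∈ is := by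
  intro is
  induction is with
  | nil => intro d; left; rfl
  | cons i rest ih =>
    intro d
    by_cases h : pvKeep fid ((PySem.List.pyGet? ats i).getD []) = true ∧
        (List.lookup "type" ((PySem.List.pyGet? ats i).getD [])).getD none = some "FILEDELETE"
    · right; simp [pvFindStop, h]
    · rcases ih d with hh | hh
      · left; simpa [pvFindStop, h] using hh
      · right; simp [pvFindStop, h, hh]

-- the range up to (and including) the found stop is exactly the take-until-first-delete prefix of the full range
lemma pvRange_stop_eq (ats : List (List (String × Option String))) (fid : Option String) (n : Int) :
    ∀ (k : Nat) (s : Int), (n - s).toNat ≤ k →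
      PySem.List.pyRange s (pvFindStop ats fid (PySem.List.pyRange s n 1) (n - 1) + 1) 1 =
        pvTake ats fid (PySem.List.pyRange s n 1) := by
  intro k
  induction k with
  | zero =>
    intro s hs
    have hsn : n ≤ s := by omega
    rw [PySem.List.pyRange_one_eq_nil hsn]
    simp [pvFindStop, pvTake]
    exact PySem.List.pyRange_one_eq_nil hsn
  | succ k ih =>
    intro s hs
    by_cases hlt : s < n
    · rw [PySem.List.pyRange_one_cons hlt]
      by_cases hkd : pvIsKD ats fid s = true
      · obtain ⟨hk, hd⟩ := (pvIsKD_iff ats fid s).mp hkd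
        unfold pvFindStop pvTake
        simp only [hk, hd, hkd, and_self, if_pos]
        exact PySem.List.pyRange_one_singleton s
      · have hnot : ¬ (pvKeep fid ((PySem.List.pyGet? ats s).getD []) = true ∧
            (List.lookup "type" ((PySem.List.pyGet? ats s).getD [])).getD none = some "FILEDELETE") := by
          intro h; exact hkd ((pvIsKD_iff ats fid s).mpr h)
        unfold pvFindStop pvTake
        simp only [hkd, if_neg hnot, Bool.false_eq_true]
        have ht := pvFindStop_mem ats fid (PySem.List.pyRange (s + 1) n 1) (n - 1)
        set t := pvFindStop ats fid (PySem.List.pyRange (s + 1) n 1) (n - 1) with htdef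
        have hst : s ≤ t := by
          rcases ht with h | h
          · omega
          · have := (PySem.List.mem_pyRange_one).mp h; omega
        rw [PySem.List.pyRange_one_cons (by omega : s < t + 1)]
        rw [ih (s + 1) (by omega)]
        simp
    · have hsn : n ≤ s := by omega
      rw [PySem.List.pyRange_one_eq_nil hsn]
      simp [pvFindStop, pvTake]
      exact PySem.List.pyRange_one_eq_nil hsn

-- ===== VERDICT (by name: the statement is the Claim_ definition above) =====
theorem collect_sequence_spec : Claim_equal_collect_sequence := by
  intro s ats _ hpre
  obtain ⟨hin, _, _⟩ := hpre
  unfold Spec_collect_sequence collect_sequence collect_sequence_alt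
  obtain ⟨d0, hd0⟩ : ∃ d0, PySem.List.pyGet? ats s = some d0 := by
    cases h : PySem.List.pyGet? ats s with
    | none => exact absurd hin ((PySem.List.pyGet?_eq_none_iff ats s).mp h)
    | some d => exact ⟨d, rfl⟩
  rw [hd0]
  simp only
  cases hf : pvTruthy ((List.lookup "entity_id" d0).getD none) with
  | false => simp
  | true =>
    have hall : ∀ i ∈ PySem.List.pyRange s (ats.length : Int) 1, (PySem.List.pyGet? ats i).isSome = true := by
      intro i hi
      rw [PySem.List.mem_pyRange_one] at hi
      rw [Option.isSome_iff_ne_none]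
      intro hn
      have hnin := (PySem.List.pyGet?_eq_none_iff ats i).mp hn
      unfold PySem.Raise.InRange at hin hnin
      omega
    rw [pvLoop_eq ats _ hf _ hall [] [] 0]
    rw [pvCut_kept_eq ats _ _ hall,
        ← pvRange_stop_eq ats _ (ats.length : Int) ((ats.length : Int) - s).toNat s (le_refl _)]
    simp
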